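-- pv_equiv track=rewrite | github.com/svavilapalli/practicepython | counttripets.py | countTripletsR1
-- ===== SOURCE A (Python) =====
-- def countTripletsR1(arr):
--     from collections import Counter
--     freq = Counter(arr)
--     total = 0
--     for count in freq.values():
--         if count >= 3:
--             total += count * (count-1) * (count-2)//6
--     return total
-- ===== SOURCE B (Python) =====
-- def countTripletsR1(arr):
--     seen = {}
--     total = 0
--     for v in arr:
--         k = seen.get(v, 0)
--         total += k * (k - 1) // 2
--         seen[v] = k + 1
--     return total
-- ===== Notes on version B (the rewrite author's own statement) =====
-- stated objective: alternative
-- what changed: Single fused pass that accumulates C(k,2) per element (k = occurrences seen so far) instead of building a full Counter first and then summing C(count,3) over its values.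
import Mathlib
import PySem

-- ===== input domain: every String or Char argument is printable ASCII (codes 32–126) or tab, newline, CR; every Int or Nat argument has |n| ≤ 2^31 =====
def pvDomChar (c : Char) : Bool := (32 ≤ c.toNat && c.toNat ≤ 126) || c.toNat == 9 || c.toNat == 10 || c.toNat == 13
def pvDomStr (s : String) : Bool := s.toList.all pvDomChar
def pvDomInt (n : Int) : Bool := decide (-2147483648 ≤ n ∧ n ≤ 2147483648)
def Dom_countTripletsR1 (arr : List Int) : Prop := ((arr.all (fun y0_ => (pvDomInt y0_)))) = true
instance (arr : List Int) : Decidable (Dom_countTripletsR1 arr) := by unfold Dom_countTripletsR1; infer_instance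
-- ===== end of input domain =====

-- B replaces A's Counter-then-formula (Σ C(c,3)) by one fused incremental pass adding C(k,2)
-- per element, k = occurrences seen so far; an alternative decomposition, not claimed faster.

-- ===== PORT A =====
def countTripletsR1 (arr : List Int) : Int :=
  let freq := PySem.Dict.counter arr
  freq.values.foldl
    (fun total count =>
      if count ≥ 3 then total + PySem.Int.floordiv (count * (count - 1) * (count - 2)) 6
      else total) 0

-- ===== PORT B =====
def bStep (st : PySem.Dict Int Int × Int) (v : Int) : PySem.Dict Int Int × Int :=
  let k := st.1.getD v 0
  (st.1.insert v (k + 1), st.2 + PySem.Int.floordiv (k * (k - 1)) 2)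

def countTripletsR1_alt (arr : List Int) : Int :=
  (arr.foldl bStep (PySem.Dict.empty, 0)).2

-- ===== PRECONDITION & SPEC =====
def Spec_countTripletsR1 (arr : List Int) (out : Int) : Prop := out = countTripletsR1_alt arr
instance (arr : List Int) (out : Int) : Decidable (Spec_countTripletsR1 arr out) := by unfold Spec_countTripletsR1; infer_instance

-- ===== CLAIM (what is proved, stated in full; the proofs are below) =====
def Claim_equal_countTripletsR1 : Prop := ∀ (arr : List Int), Dom_countTripletsR1 arr → Spec_countTripletsR1 arr (countTripletsR1 arr)

-- ===== LEMMAS AND PROOFS =====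

-- common value both programs compute: Σ over the distinct elements of C(count, 3)
def tripS (xs : List Int) : Int := ∑ v ∈ xs.toFinset, ((xs.count v).choose 3 : Int)

theorem ch2_mul (n : Nat) : n.choose 2 * 2 = n * (n - 1) := by
  rw [Nat.choose_two_right, Nat.div_mul_cancel (Nat.even_mul_pred_self n).two_dvd]

theorem ch3_step (m : Nat) : m * (m - 1) * 3 + m * (m - 1) * (m - 2) = (m + 1) * m * (m - 1) := by
  match m with
  | 0 => rfl
  | 1 => rfl
  | j + 2 =>
    have h1 : j + 2 - 1 = j + 1 := by omega
    have h2 : j + 2 - 2 = j := by omega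
    rw [h1, h2]; ring

theorem ch3_mul (n : Nat) : n.choose 3 * 6 = n * (n - 1) * (n - 2) := by
  induction n with
  | zero => rfl
  | succ m ih =>
    have h2 : m.choose 2 * 6 = m * (m - 1) * 3 := by
      have := ch2_mul m; omega
    have e1 : m + 1 - 1 = m := by omega
    have e2 : m + 1 - 2 = m - 1 := by omega
    rw [Nat.choose_succ_succ, Nat.add_mul, h2, ih, e1, e2, ch3_step]

theorem c2_cast (n : Nat) :
    PySem.Int.floordiv ((n : Int) * ((n : Int) - 1)) 2 = (n.choose 2 : Int) := by
  match n with
  | 0 => decide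
  | m + 1 =>
    have h : ((m + 1 : Nat) : Int) * (((m + 1 : Nat) : Int) - 1) = (((m + 1) * m : Nat) : Int) := by
      push_cast; ring
    have hf : PySem.Int.floordiv ((((m + 1) * m : Nat)) : Int) 2 = (((m + 1) * m / 2 : Nat) : Int) := by
      exact_mod_cast PySem.Int.floordiv_natCast ((m + 1) * m) 2
    rw [h, hf]
    congr 1
    have := ch2_mul (m + 1)
    simp only [Nat.add_sub_cancel] at this
    omega

theorem c3_cast (n : Nat) :
    PySem.Int.floordiv ((n : Int) * ((n : Int) - 1) * ((n : Int) - 2)) 6 = (n.choose 3 : Int) := by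
  match n with
  | 0 => decide
  | 1 => decide
  | m + 2 =>
    have h : ((m + 2 : Nat) : Int) * (((m + 2 : Nat) : Int) - 1) * (((m + 2 : Nat) : Int) - 2)
        = (((m + 2) * (m + 1) * m : Nat) : Int) := by push_cast; ring
    have hf : PySem.Int.floordiv ((((m + 2) * (m + 1) * m : Nat)) : Int) 6
        = (((m + 2) * (m + 1) * m / 6 : Nat) : Int) := by
      exact_mod_cast PySem.Int.floordiv_natCast ((m + 2) * (m + 1) * m) 6
    rw [h, hf]
    have hn : (m + 2) * (m + 1) * m / 6 = (m + 2).choose 3 := by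
      have hm := ch3_mul (m + 2)
      have e1 : m + 2 - 1 = m + 1 := by omega
      have e2 : m + 2 - 2 = m := by omega
      rw [e1, e2] at hm
      rw [← hm, Nat.mul_div_cancel _ (by norm_num)]
    exact_mod_cast hn

theorem ite_c3_cast (n : Nat) :
    (if (n : Int) ≥ 3 then PySem.Int.floordiv ((n : Int) * ((n : Int) - 1) * ((n : Int) - 2)) 6 else 0)
      = (n.choose 3 : Int) := by
  by_cases h : (n : Int) ≥ 3
  · rw [if_pos h, c3_cast]
  · rw [if_neg h]
    have hn : n < 3 := by exact_mod_cast by omega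
    interval_cases n <;> decide

-- A's accumulation loop is init + a sum
theorem a_foldl (l : List Int) (init : Int) :
    l.foldl (fun total count =>
      if count ≥ 3 then total + PySem.Int.floordiv (count * (count - 1) * (count - 2)) 6
      else total) init
    = init + (l.map (fun c =>
        if c ≥ 3 then PySem.Int.floordiv (c * (c - 1) * (c - 2)) 6 else 0)).sum := by
  induction l generalizing init with
  | nil => simp
  | cons c l ih =>
    simp only [List.foldl_cons, List.map_cons, List.sum_cons, ih]
    split_ifs <;> ring

theorem ofList_toFinset (xs : List Int) : (PySem.Set.ofList xs).toFinset = xs.toFinset := by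
  ext v
  simp [List.mem_toFinset, PySem.Set.mem_ofList]

theorem a_eq_tripS (arr : List Int) : countTripletsR1 arr = tripS arr := by
  unfold countTripletsR1 tripS
  rw [a_foldl, zero_add]
  simp only [PySem.Dict.values, PySem.Dict.items_counter, List.map_map]
  rw [← ofList_toFinset arr,
    List.sum_toFinset _ (PySem.Set.nodup_ofList arr)]
  congr 1
  apply List.map_congr_left
  intro v _
  simpa using ite_c3_cast (arr.count v)

-- B's dict component is exactly the running counter
theorem b_fst (xs : List Int) (d : PySem.Dict Int Int) (t : Int) :
    (xs.foldl bStep (d, t)).1 = xs.foldl (fun d x => d.insert x (d.getD x 0 + 1)) d := by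
  induction xs generalizing d t with
  | nil => rfl
  | cons x xs ih => simp only [List.foldl_cons, bStep]; exact ih _ _

theorem b_append (xs : List Int) (x : Int) :
    countTripletsR1_alt (xs ++ [x])
      = countTripletsR1_alt xs
        + PySem.Int.floordiv ((xs.count x : Int) * ((xs.count x : Int) - 1)) 2 := by
  unfold countTripletsR1_alt
  rw [List.foldl_append]
  have hfst := b_fst xs PySem.Dict.empty 0
  rw [PySem.Dict.foldl_insert_getD_add_one_eq_counter] at hfst
  rcases h : xs.foldl bStep (PySem.Dict.empty, 0) with ⟨d, t⟩
  rw [h] at hfst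
  have hd : d = PySem.Dict.counter xs := hfst
  subst hd
  simp only [List.foldl_cons, List.foldl_nil, bStep]
  simp [PySem.Dict.getD_counter]

theorem tripS_append (xs : List Int) (x : Int) :
    tripS (xs ++ [x]) = tripS xs + ((xs.count x).choose 2 : Int) := by
  unfold tripS
  have hcnt : ∀ v : Int, (xs ++ [x]).count v = xs.count v + if x = v then 1 else 0 := by
    intro v
    by_cases h : x = v
    · subst h; simp [List.count_append]
    · have : List.count v [x] = 0 := by
        simp [List.count_cons, List.count_nil]
        exact h
      simp [List.count_append, this, h]
  by_cases hx : x ∈ xs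
  · have hfs : (xs ++ [x]).toFinset = xs.toFinset := by
      ext v; simp [List.mem_toFinset]; intro h; subst h; exact hx
    rw [hfs]
    have hxmem : x ∈ xs.toFinset := List.mem_toFinset.mpr hx
    rw [Finset.sum_eq_sum_diff_singleton_add hxmem
        (fun v => (((xs ++ [x]).count v).choose 3 : Int)),
      Finset.sum_eq_sum_diff_singleton_add hxmem
        (fun v => ((xs.count v).choose 3 : Int))]
    have hsame : ∑ v ∈ xs.toFinset \ {x}, (((xs ++ [x]).count v).choose 3 : Int)
        = ∑ v ∈ xs.toFinset \ {x}, ((xs.count v).choose 3 : Int) := by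
      apply Finset.sum_congr rfl
      intro v hv
      have hvx : x ≠ v := by
        rcases Finset.mem_sdiff.mp hv with ⟨_, hnv⟩
        simp at hnv; omega
      rw [hcnt v, if_neg hvx, Nat.add_zero]
    rw [hsame, hcnt x, if_pos rfl]
    have hrec : (xs.count x + 1).choose 3 = (xs.count x).choose 2 + (xs.count x).choose 3 :=
      Nat.choose_succ_succ _ _
    push_cast [hrec]
    ring
  · have hfs : (xs ++ [x]).toFinset = insert x xs.toFinset := by
      ext v; simp [List.mem_toFinset]
    rw [hfs, Finset.sum_insert (by simp [List.mem_toFinset, hx])]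
    have hcx : xs.count x = 0 := List.count_eq_zero_of_not_mem hx
    have hsame : ∑ v ∈ xs.toFinset, (((xs ++ [x]).count v).choose 3 : Int)
        = ∑ v ∈ xs.toFinset, ((xs.count v).choose 3 : Int) := by
      apply Finset.sum_congr rfl
      intro v hv
      have hvx : x ≠ v := fun h => hx (h ▸ List.mem_toFinset.mp hv)
      rw [hcnt v, if_neg hvx, Nat.add_zero]
    rw [hsame, hcnt x, if_pos rfl, hcx]
    norm_num

theorem b_eq_tripS (arr : List Int) : countTripletsR1_alt arr = tripS arr := by
  induction arr using List.reverseRecOn with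
  | nil => rfl
  | append_singleton xs x ih =>
    rw [b_append, tripS_append, ih, c2_cast]

-- ===== VERDICT (by name: the statement is the Claim_ definition above) =====
theorem countTripletsR1_spec : Claim_equal_countTripletsR1 := by
  intro arr _
  unfold Spec_countTripletsR1
  rw [a_eq_tripS, b_eq_tripS]
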